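-- pv_equiv track=rewrite | github.com/GoodOnPaper/small_codes | python_things/test.py | tempfun
-- ===== SOURCE A (Python) =====
-- def erastotenes_sieve(n: int) -> list[int]:
--     if n < 1:
--         return []
--     primes: list[int] = [2]
--     curr_int: int = 2
--     while len(primes) < n:
--         curr_int += 1
--         do_add: bool = True
--         for div in primes:
--             if curr_int % div == 0:
--                 do_add = False
--                 break
--         if do_add:
--             primes.append(curr_int)
--     return primes
--
-- def tempfun(n: int) -> list[int]:
--     primes = erastotenes_sieve(n + 2)
--     primes = primes[2:]
--     result: list[int] = []
--     for iter in range(len(primes)):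
--         for idx in range(0, iter+1):
--             result.append((primes[iter]*primes[idx]))
--     return sorted(result)
-- ===== SOURCE B (Python) =====
-- def tempfun(n: int) -> list[int]:
--     k = n + 2
--     primes: list[int] = []
--     c = 2
--     while len(primes) < k:
--         is_prime = True
--         for p in primes:
--             if p * p > c:
--                 break
--             if c % p == 0:
--                 is_prime = False
--                 break
--         if is_prime:
--             primes.append(c)
--         c += 1
--     odd_primes = primes[2:]
--     return sorted(p * q for i, p in enumerate(odd_primes) for q in odd_primes[:i + 1])
-- ===== Notes on version B (the rewrite author's own statement) =====
-- stated objective: alternative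
-- what changed: The sieve's primality test trial-divides only by found primes up to sqrt(candidate), breaking as soon as p*p > c (A divides by every previously found prime), and the pairwise products are built by an enumerate/prefix-slice comprehension instead of nested index loops.
import Mathlib
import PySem

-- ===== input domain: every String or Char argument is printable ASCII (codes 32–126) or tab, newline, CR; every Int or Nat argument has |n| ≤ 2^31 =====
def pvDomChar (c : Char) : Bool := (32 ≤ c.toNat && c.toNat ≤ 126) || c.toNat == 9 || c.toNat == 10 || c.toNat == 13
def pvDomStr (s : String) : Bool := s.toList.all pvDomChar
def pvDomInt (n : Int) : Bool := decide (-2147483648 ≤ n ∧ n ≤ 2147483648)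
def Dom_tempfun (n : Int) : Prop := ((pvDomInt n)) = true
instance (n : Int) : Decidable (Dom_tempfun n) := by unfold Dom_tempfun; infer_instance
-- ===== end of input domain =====

-- B replaces A's primality test (trial division by every previously found prime) with one that
-- stops as soon as div*div exceeds the candidate, and builds the products by an enumerate/slice
-- comprehension; same return value, no side effects.

-- ===== PORT A =====
-- 'for div in primes: if curr_int % div == 0: do_add = False; break'
def pvTestA (c : Int) : List Int → Bool
  | [] => true
  | d :: rest => if PySem.Int.mod c d == 0 then false else pvTestA c rest

-- 'while len(primes) < n': fuel is a totality guard only; n*n + 4 iterations always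
-- suffice to reach the n-th prime, and the loop exits as soon as len(primes) = n.
def pvSieveLoopA (fuel : Nat) (n : Int) (primes : List Int) (curr : Int) : List Int :=
  match fuel with
  | 0 => primes
  | fuel + 1 =>
    if (primes.length : Int) < n then
      if pvTestA (curr + 1) primes then pvSieveLoopA fuel n (primes ++ [curr + 1]) (curr + 1)
      else pvSieveLoopA fuel n primes (curr + 1)
    else primes

def erastotenes_sieve (n : Int) : List Int :=
  if n < 1 then [] else pvSieveLoopA ((n * n).toNat + 4) n [2] 2

def tempfun (n : Int) : List Int :=
  let primes := erastotenes_sieve (n + 2)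
  let primes := PySem.List.slice primes (some 2) none
  let result := (PySem.List.pyRange 0 (primes.length : Int) 1).foldl (fun acc iter =>
      (PySem.List.pyRange 0 (iter + 1) 1).foldl (fun acc2 idx =>
        acc2 ++ [PySem.List.pyGetD primes iter 0 * PySem.List.pyGetD primes idx 0]) acc) []
  PySem.List.sorted result (fun x => x) false

-- ===== PORT B =====
-- 'for p in primes: if p*p > c: break; if c % p == 0: is_prime = False; break'
def pvTestB (c : Int) : List Int → Bool
  | [] => true
  | p :: rest =>
    if p * p > c then true
    else if PySem.Int.mod c p == 0 then false
    else pvTestB c rest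

-- fuel is a totality guard only, as in port A (B's loop starts one candidate earlier).
def pvSieveLoopB (fuel : Nat) (k : Int) (primes : List Int) (c : Int) : List Int :=
  match fuel with
  | 0 => primes
  | fuel + 1 =>
    if (primes.length : Int) < k then
      pvSieveLoopB fuel k (if pvTestB c primes then primes ++ [c] else primes) (c + 1)
    else primes

def tempfun_alt (n : Int) : List Int :=
  let k := n + 2
  let primes := pvSieveLoopB ((k * k).toNat + 5) k [] 2
  let odd := PySem.List.slice primes (some 2) none
  PySem.List.sorted ((PySem.List.enumerate odd 0).flatMap (fun ip =>
    (PySem.List.slice odd none (some (ip.1 + 1))).map (fun q => ip.2 * q))) (fun x => x) false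

-- ===== PRECONDITION & SPEC =====
def Spec_tempfun (n : Int) (out : List Int) : Prop := out = tempfun_alt n
instance (n : Int) (out : List Int) : Decidable (Spec_tempfun n out) := by unfold Spec_tempfun; infer_instance

-- ===== CLAIM (what is proved, stated in full; the proofs are below) =====
def Claim_equal_tempfun : Prop := ∀ (n : Int), Dom_tempfun n → Spec_tempfun n (tempfun n)

-- ===== LEMMAS AND PROOFS =====

-- all primes below c, in increasing order, as Ints: the loop invariant of both sieves
def pvPB (c : Nat) : List Int :=
  List.map (fun m : Nat => (m : Int)) ((List.range c).filter (fun m => decide (Nat.Prime m)))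

lemma pvPB_succ (c : Nat) :
    pvPB (c + 1) = pvPB c ++ (if Nat.Prime c then [(c : Int)] else []) := by
  unfold pvPB
  rw [List.range_succ, List.filter_append, List.map_append]
  by_cases h : Nat.Prime c <;> simp [h]

lemma mem_pvPB (c : Nat) (x : Int) :
    x ∈ pvPB c ↔ ∃ m : Nat, Nat.Prime m ∧ m < c ∧ x = (m : Int) := by
  unfold pvPB
  simp only [List.mem_map, List.mem_filter, List.mem_range, decide_eq_true_eq]
  tauto

lemma pvPB_pairwise (c : Nat) : (pvPB c).Pairwise (· < ·) := by
  unfold pvPB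
  apply List.Pairwise.map (R := fun a b : Nat => a < b)
  · intro a b h; exact_mod_cast h
  · exact (List.pairwise_lt_range).filter _

lemma pvTestA_true_iff (c : Int) (P : List Int) :
    pvTestA c P = true ↔ ∀ d ∈ P, ¬ PySem.Int.mod c d = 0 := by
  induction P with
  | nil => simp [pvTestA]
  | cons d rest ih =>
    by_cases h : PySem.Int.mod c d = 0 <;> simp [pvTestA, h, ih]

lemma pvTestB_true_iff (c : Int) (P : List Int) (hs : P.Pairwise (· ≤ ·))
    (hn : ∀ p ∈ P, 0 ≤ p) :
    pvTestB c P = true ↔ ∀ p ∈ P, p * p ≤ c → ¬ PySem.Int.mod c p = 0 := by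
  induction P with
  | nil => simp [pvTestB]
  | cons p rest ih =>
    rcases List.pairwise_cons.mp hs with ⟨hple, hrest⟩
    have hp0 : 0 ≤ p := hn p (by simp)
    by_cases hgt : p * p > c
    · simp only [pvTestB, if_pos hgt, true_iff]
      intro q hq hqq
      rcases List.mem_cons.mp hq with rfl | hq'
      · omega
      · have h1 : p ≤ q := hple q hq'
        have h2 : p * p ≤ q * q := mul_le_mul h1 h1 hp0 (le_trans hp0 h1)
        omega
    · by_cases hm : PySem.Int.mod c p = 0
      · have hmb : (PySem.Int.mod c p == 0) = true := by simp [hm]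
        simp only [pvTestB, if_neg hgt, hmb, if_true]
        constructor
        · intro h; exact absurd h (by simp)
        · intro h; exact absurd hm (h p (by simp) (by omega))
      · have hmb : (PySem.Int.mod c p == 0) = false := by simp [hm]
        simp only [pvTestB, if_neg hgt, hmb, Bool.false_eq_true, if_false]
        rw [ih hrest (fun q hq => hn q (List.mem_cons_of_mem _ hq))]
        constructor
        · intro h q hq hqq
          rcases List.mem_cons.mp hq with rfl | hq'
          · exact hm
          · exact h q hq' hqq
        · intro h q hq hqq; exact h q (List.mem_cons_of_mem _ hq) hqq

-- a number c ≥ 2 with no prime divisor below it is prime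
lemma prime_of_no_small_prime_divisor (c : Nat) (h2 : 2 ≤ c)
    (h : ∀ m : Nat, Nat.Prime m → m < c → ¬ m ∣ c) : Nat.Prime c := by
  by_contra hnp
  have hmf : Nat.Prime c.minFac := Nat.minFac_prime (by omega)
  have hdvd : c.minFac ∣ c := Nat.minFac_dvd c
  have hlt : c.minFac < c := by
    rcases lt_or_eq_of_le (Nat.le_of_dvd (by omega) hdvd) with h' | h'
    · exact h'
    · exact absurd (Nat.prime_def_minFac.mpr ⟨h2, h'⟩) hnp
  exact h c.minFac hmf hlt hdvd

lemma pvTestA_decides (c : Nat) (h2 : 2 ≤ c) :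
    pvTestA (c : Int) (pvPB c) = decide (Nat.Prime c) := by
  rw [Bool.eq_iff_iff, decide_eq_true_iff, pvTestA_true_iff]
  constructor
  · intro h
    apply prime_of_no_small_prime_divisor c h2
    intro m hm hlt hdvd
    apply h (m : Int) ((mem_pvPB c _).mpr ⟨m, hm, hlt, rfl⟩)
    rw [PySem.Int.mod_eq_zero_iff_dvd]
    exact_mod_cast hdvd
  · intro hp d hd hmod
    rcases (mem_pvPB c d).mp hd with ⟨m, hm, hlt, rfl⟩
    rw [PySem.Int.mod_eq_zero_iff_dvd] at hmod
    have hdvd : m ∣ c := by exact_mod_cast hmod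
    rcases hp.eq_one_or_self_of_dvd m hdvd with h1 | h1
    · exact hm.one_lt.ne' h1
    · omega

lemma pvTestB_decides (c : Nat) (h2 : 2 ≤ c) :
    pvTestB (c : Int) (pvPB c) = decide (Nat.Prime c) := by
  rw [Bool.eq_iff_iff, decide_eq_true_iff,
    pvTestB_true_iff _ _ ((pvPB_pairwise c).imp le_of_lt)
      (fun p hp => by rcases (mem_pvPB c p).mp hp with ⟨m, _, _, rfl⟩; positivity)]
  constructor
  · intro h
    by_contra hnp
    have hmf : Nat.Prime c.minFac := Nat.minFac_prime (by omega)
    have hdvd : c.minFac ∣ c := Nat.minFac_dvd c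
    have hlt : c.minFac < c := by
      rcases lt_or_eq_of_le (Nat.le_of_dvd (by omega) hdvd) with h' | h'
      · exact h'
      · exact absurd (Nat.prime_def_minFac.mpr ⟨h2, h'⟩) hnp
    have hsq : c.minFac * c.minFac ≤ c := by
      have := Nat.minFac_sq_le_self (by omega) hnp
      rwa [pow_two] at this
    apply h ((c.minFac : Nat) : Int) ((mem_pvPB c _).mpr ⟨c.minFac, hmf, hlt, rfl⟩)
      (by exact_mod_cast hsq)
    rw [PySem.Int.mod_eq_zero_iff_dvd]
    exact_mod_cast hdvd
  · intro hp d hd _ hmod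
    rcases (mem_pvPB c d).mp hd with ⟨m, hm, hlt, rfl⟩
    rw [PySem.Int.mod_eq_zero_iff_dvd] at hmod
    have hdvd : m ∣ c := by exact_mod_cast hmod
    rcases hp.eq_one_or_self_of_dvd m hdvd with h1 | h1
    · exact hm.one_lt.ne' h1
    · omega

-- both loops advance through the same invariant states (B tests the candidate A will test next)
lemma pvLoop_eq (fuel : Nat) : ∀ (k : Int) (c : Nat), 2 ≤ c →
    pvSieveLoopA fuel k (pvPB (c + 1)) (c : Int)
      = pvSieveLoopB fuel k (pvPB (c + 1)) ((c : Int) + 1) := by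
  induction fuel with
  | zero => intro k c _; rfl
  | succ fuel ih =>
    intro k c hc
    simp only [pvSieveLoopA, pvSieveLoopB]
    by_cases hlen : ((pvPB (c + 1)).length : Int) < k
    · rw [if_pos hlen, if_pos hlen]
      have hc1 : (c : Int) + 1 = ((c + 1 : Nat) : Int) := by push_cast; ring
      have hA : pvTestA ((c : Int) + 1) (pvPB (c + 1)) = decide (Nat.Prime (c + 1)) := by
        rw [hc1]; exact pvTestA_decides (c + 1) (by omega)
      have hB : pvTestB ((c : Int) + 1) (pvPB (c + 1)) = decide (Nat.Prime (c + 1)) := by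
        rw [hc1]; exact pvTestB_decides (c + 1) (by omega)
      rw [hA, hB]
      by_cases hpr : Nat.Prime (c + 1)
      · simp only [hpr, decide_true]
        have hnew : pvPB (c + 1) ++ [(c : Int) + 1] = pvPB (c + 2) := by
          rw [pvPB_succ (c + 1), if_pos hpr, hc1]
        rw [hnew]
        have h := ih k (c + 1) (by omega)
        push_cast at h
        convert h using 2
      · simp only [hpr, decide_false]
        have hnew : pvPB (c + 1) = pvPB (c + 2) := by
          rw [pvPB_succ (c + 1), if_neg hpr, List.append_nil]
        rw [hnew]
        have h := ih k (c + 1) (by omega)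
        push_cast at h
        convert h using 2
    · rw [if_neg hlen, if_neg hlen]

lemma pvSieve_eq (k : Int) :
    erastotenes_sieve k = pvSieveLoopB ((k * k).toNat + 5) k [] 2 := by
  have h5 : (k * k).toNat + 5 = ((k * k).toNat + 4) + 1 := by omega
  rw [h5]
  unfold erastotenes_sieve
  by_cases hk : k < 1
  · rw [if_pos hk]
    simp only [pvSieveLoopB, List.length_nil, Nat.cast_zero]
    rw [if_neg (by omega)]
  · rw [if_neg hk]
    have hstep : pvSieveLoopB (((k * k).toNat + 4) + 1) k [] 2
        = pvSieveLoopB ((k * k).toNat + 4) k [(2 : Int)] 3 := by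
      simp only [pvSieveLoopB, List.length_nil, Nat.cast_zero]
      rw [if_pos (by omega)]
      rfl
    rw [hstep]
    have h := pvLoop_eq ((k * k).toNat + 4) k 2 (by omega)
    have hpb : pvPB 3 = [(2 : Int)] := by decide
    rw [hpb] at h
    norm_num at h
    exact h

lemma pvMapRangeGetD (xs : List Int) (m : Nat) (h : m ≤ xs.length) :
    (List.range m).map (fun k => xs.getD k 0) = xs.take m := by
  apply List.ext_getElem
  · simp; omega
  · intro i h1 h2
    simp only [List.length_map, List.length_range] at h1
    have hi : i < xs.length := by omega
    simp [List.getElem_map, List.getElem_range, List.getElem_take,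
      List.getD_eq_getElem?_getD, List.getElem?_eq_getElem hi]

-- A's double index loop over ranges produces exactly B's enumerate/slice comprehension
lemma pvProd_eq (xs : List Int) :
    (PySem.List.pyRange 0 (xs.length : Int) 1).foldl (fun acc iter =>
        (PySem.List.pyRange 0 (iter + 1) 1).foldl (fun acc2 idx =>
          acc2 ++ [PySem.List.pyGetD xs iter 0 * PySem.List.pyGetD xs idx 0]) acc) []
      = (PySem.List.enumerate xs 0).flatMap (fun ip =>
          (PySem.List.slice xs none (some (ip.1 + 1))).map (fun q => ip.2 * q)) := by
  rw [PySem.List.enumerate_eq_map_pyRange xs 0, List.flatMap_map]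
  simp only [PySem.List.foldl_append_singleton_eq_map, PySem.List.foldl_append_eq_flatMap,
    List.nil_append, PySem.List.len_eq]
  apply List.flatMap_congr
  intro j hj
  have hjmem := (PySem.List.mem_pyRange_one).mp hj
  obtain ⟨m, rfl⟩ : ∃ m : Nat, j = (m : Int) := ⟨j.toNat, by omega⟩
  have hm : m < xs.length := by exact_mod_cast hjmem.2
  have hr : PySem.List.pyRange 0 ((m : Int) + 1) 1
      = (List.range (m + 1)).map (fun k : Nat => (k : Int)) := by
    rw [PySem.List.pyRange_one]
    rw [show (((m : Int) + 1) - 0).toNat = m + 1 by omega]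
    simp
  rw [hr, List.map_map,
    PySem.List.slice_to xs (show (0 : Int) ≤ (m : Int) + 1 by positivity),
    show ((m : Int) + 1).toNat = m + 1 by omega,
    ← pvMapRangeGetD xs (m + 1) (by omega), List.map_map]
  simp [Function.comp, PySem.List.pyGetD_natCast]

-- ===== VERDICT (by name: the statement is the Claim_ definition above) =====
theorem tempfun_spec : Claim_equal_tempfun := by
  intro n _
  unfold Spec_tempfun
  simp only [tempfun, tempfun_alt]
  rw [pvSieve_eq (n + 2), pvProd_eq]
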